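-- pv_equiv track=rewrite | github.com/cirosantilli/project-euler-solvers | solvers/118.py | search
-- ===== SOURCE A (Python) =====
-- from typing import List
--
-- sieve: bytearray = bytearray()
--
-- def is_prime(x: int) -> bool:
--     if x % 2 == 0:
--         return x == 2
--     if x >= len(sieve) * 2:
--         i = 3
--         while i * i <= x:
--             if x % i == 0:
--                 return False
--             i += 2
--         return True
--     return bool(sieve[x >> 1])
--
-- def search(digits: List[int], merged: List[int], first_pos: int = 0) -> int:
--     if first_pos == len(digits):
--         return 1
--
--     total = 0
--     current = 0
--     while first_pos < len(digits):
--         current = current * 10 + digits[first_pos]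
--         first_pos += 1
--
--         if merged and current < merged[-1]:
--             continue
--
--         if is_prime(current):
--             merged.append(current)
--             total += search(digits, merged, first_pos)
--             merged.pop()
--
--     return total
-- ===== SOURCE B (Python) =====
-- from typing import List
--
--
-- def _is_prime(x: int) -> bool:
--     if x % 2 == 0:
--         return x == 2
--     i = 3
--     while i * i <= x:
--         if x % i == 0:
--             return False
--         i += 2
--     return True
--
--
-- def search(digits: List[int], merged: List[int], first_pos: int = 0) -> int:
--     # Memoized recursion on (position, value of the previous chunk):
--     # each reachable state is computed once and looked up afterwards.
--     n = len(digits)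
--     memo = {}
--
--     def count(pos: int, low) -> int:
--         if pos == n:
--             return 1
--         key = (pos, low)
--         if key in memo:
--             return memo[key]
--         total = 0
--         cur = 0
--         for i in range(pos, n):
--             cur = cur * 10 + digits[i]
--             if (low is None or cur >= low) and _is_prime(cur):
--                 total += count(i + 1, cur)
--         memo[key] = total
--         return total
--
--     return count(first_pos, merged[-1] if merged else None)
-- ===== Notes on version B (the rewrite author's own statement) =====
-- stated objective: alternative
-- what changed: A explores every non-decreasing prime partition by plain recursion with backtracking on the shared `merged` list; B is a dictionary-memoized recursion on the state (position, value of the previous chunk), so each reachable state is computed once and looked up afterwards.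
-- outside the precondition, e.g. on search([-2], [], 0): A returns 0, B returns 0; on search([-3], [], 0): A raises IndexError, B returns 1
import Mathlib
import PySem

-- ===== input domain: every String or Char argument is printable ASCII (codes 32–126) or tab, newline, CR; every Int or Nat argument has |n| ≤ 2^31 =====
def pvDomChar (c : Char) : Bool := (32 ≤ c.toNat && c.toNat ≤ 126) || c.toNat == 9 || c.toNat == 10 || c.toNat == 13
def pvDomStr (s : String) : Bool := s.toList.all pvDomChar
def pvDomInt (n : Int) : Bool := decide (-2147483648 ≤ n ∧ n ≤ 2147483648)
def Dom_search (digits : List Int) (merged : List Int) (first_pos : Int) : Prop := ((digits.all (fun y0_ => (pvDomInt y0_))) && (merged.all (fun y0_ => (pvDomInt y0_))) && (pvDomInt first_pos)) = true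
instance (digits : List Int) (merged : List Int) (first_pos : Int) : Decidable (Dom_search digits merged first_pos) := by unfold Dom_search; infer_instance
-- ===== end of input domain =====

-- B re-implements the count as memoized recursion on (position, previous chunk value)
-- instead of A's backtracking DFS over the shared `merged` list; equivalence is about
-- the RETURN value only (A temporarily appends to / pops from `merged` but restores it).

-- ===== PORT A =====
-- shared helper: the trial-division while loop 'while i * i <= x: …' appearing
-- verbatim in A's is_prime and in B's _is_prime
def trialLoop (x : Int) (i : Int) : Bool :=
  if i * i ≤ x then
    if PySem.Int.mod x i == 0 then false
    else trialLoop x (i + 2)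
  else true
termination_by (x + 2 - i).toNat
decreasing_by
  rename_i h _
  have hii : i ≤ i * i := by nlinarith [sq_nonneg (2 * i - 1)]
  omega

-- A's is_prime with the module's empty sieve: len(sieve) = 0, so odd x < 0 indexes
-- the empty bytearray and raises IndexError (excluded by Pre_; the port returns false there)
def isPrimeA (x : Int) : Bool :=
  if PySem.Int.mod x 2 == 0 then x == 2
  else if 0 ≤ x then trialLoop x 3
  else false

mutual
-- the while loop of A: state (first_pos, current), accumulating total
def goA (digits : List Int) (merged : List Int) (pos : Int) (cur : Int) : Int :=
  if _h : pos < (digits.length : Int) then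
    match PySem.List.pyGet? digits pos with
    | none => 0   -- IndexError (pos < -len); excluded by Pre_
    | some d =>
      let c := cur * 10 + d
      if (match merged.getLast? with | some l => decide (c < l) | none => false) then
        goA digits merged (pos + 1) c
      else if isPrimeA c then
        search digits (merged ++ [c]) (pos + 1) + goA digits merged (pos + 1) c
      else goA digits merged (pos + 1) c
  else 0
termination_by ((digits.length : Int) - pos).toNat * 2
decreasing_by
  all_goals omega

def search (digits : List Int) (merged : List Int) (first_pos : Int) : Int :=
  if first_pos == (digits.length : Int) then 1
  else goA digits merged first_pos 0
termination_by ((digits.length : Int) - first_pos).toNat * 2 + 1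
decreasing_by
  all_goals omega
end

-- ===== PORT B =====
-- B's _is_prime (no sieve, no sign test): same trial-division loop
def isPrimeB (x : Int) : Bool :=
  if PySem.Int.mod x 2 == 0 then x == 2
  else trialLoop x 3

mutual
-- the 'for i in range(pos, n)' loop of B's count, threading (cur, total, memo)
def loopB (digits : List Int) (n : Int) (i : Int) (cur : Int) (total : Int)
    (low : Option Int) (memo : PySem.Dict (Int × Option Int) Int) :
    Int × PySem.Dict (Int × Option Int) Int :=
  if _h : i < n then
    match PySem.List.pyGet? digits i with
    | none => (total, memo)   -- IndexError; excluded by Pre_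
    | some d =>
      let c := cur * 10 + d
      if (match low with | none => true | some l => decide (l ≤ c)) && isPrimeB c then
        let r := countB digits n (i + 1) (some c) memo
        loopB digits n (i + 1) c (total + r.1) low r.2
      else loopB digits n (i + 1) c total low memo
  else (total, memo)
termination_by (n - i).toNat * 2
decreasing_by
  all_goals omega

def countB (digits : List Int) (n : Int) (pos : Int) (low : Option Int)
    (memo : PySem.Dict (Int × Option Int) Int) :
    Int × PySem.Dict (Int × Option Int) Int :=
  if pos == n then (1, memo)
  else
    match memo.get? (pos, low) with
    | some v => (v, memo)
    | none =>
      let r := loopB digits n pos 0 0 low memo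
      (r.1, r.2.insert (pos, low) r.1)
termination_by (n - pos).toNat * 2 + 1
decreasing_by
  all_goals omega
end

def search_alt (digits : List Int) (merged : List Int) (first_pos : Int) : Int :=
  (countB digits (digits.length : Int) first_pos merged.getLast? PySem.Dict.empty).1

-- ===== PRECONDITION & SPEC =====
-- Pre_ requires nonnegative digits and first_pos ≥ -len(digits): a negative odd chunk
-- value makes A's is_prime index the empty sieve and raise IndexError (which exact
-- raising set is not closed-form, so all lists with a negative digit are excluded,
-- including some all-even ones on which A still returns), and first_pos < -len(digits)
-- raises IndexError at digits[first_pos].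
def Pre_search (digits : List Int) (merged : List Int) (first_pos : Int) : Prop :=
  (∀ d ∈ digits, 0 ≤ d) ∧ -(digits.length : Int) ≤ first_pos
instance (digits : List Int) (merged : List Int) (first_pos : Int) : Decidable (Pre_search digits merged first_pos) := by unfold Pre_search; infer_instance
def pvWitness_search : List Int × List Int × Int := ([2, 3, 3], [], 0)

def Spec_search (digits : List Int) (merged : List Int) (first_pos : Int) (out : Int) : Prop := out = search_alt digits merged first_pos
instance (digits : List Int) (merged : List Int) (first_pos : Int) (out : Int) : Decidable (Spec_search digits merged first_pos out) := by unfold Spec_search; infer_instance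

-- ===== CLAIM (what is proved, stated in full; the proofs are below) =====
def Claim_equal_search : Prop := ∀ (digits : List Int) (merged : List Int) (first_pos : Int), Dom_search digits merged first_pos → Pre_search digits merged first_pos → Spec_search digits merged first_pos (search digits merged first_pos)

-- ===== LEMMAS AND PROOFS =====

-- the common mathematical content of both ports: the memo-free count, on
-- (position, value of the previous chunk), using A's prime test
mutual
def gS (digits : List Int) (i : Int) (cur : Int) (low : Option Int) : Int :=
  if _h : i < (digits.length : Int) then
    match PySem.List.pyGet? digits i with
    | none => 0
    | some d =>
      let c := cur * 10 + d
      (if (match low with | none => true | some l => decide (l ≤ c)) && isPrimeA c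
       then fS digits (i + 1) (some c) else 0) + gS digits (i + 1) c low
  else 0
termination_by ((digits.length : Int) - i).toNat * 2
decreasing_by
  all_goals omega

def fS (digits : List Int) (pos : Int) (low : Option Int) : Int :=
  if pos == (digits.length : Int) then 1 else gS digits pos 0 low
termination_by ((digits.length : Int) - pos).toNat * 2 + 1
decreasing_by
  all_goals omega
end

theorem isPrimeB_eq (x : Int) (hx : 0 ≤ x) : isPrimeB x = isPrimeA x := by
  unfold isPrimeA isPrimeB
  split_ifs with h1 _h3 <;> simp_all

theorem A_eq (k : ℕ) :
    (∀ (digits merged : List Int) (pos cur : Int),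
      (((digits.length : Int) - pos).toNat ≤ k) →
      goA digits merged pos cur = gS digits pos cur merged.getLast?) ∧
    (∀ (digits merged : List Int) (pos : Int),
      (((digits.length : Int) - pos).toNat ≤ k) →
      search digits merged pos = fS digits pos merged.getLast?) := by
  induction k with
  | zero =>
    have hg : ∀ (digits merged : List Int) (pos cur : Int),
        (((digits.length : Int) - pos).toNat ≤ 0) →
        goA digits merged pos cur = gS digits pos cur merged.getLast? := by
      intro digits merged pos cur hk
      have h : ¬ (pos < (digits.length : Int)) := by omega
      rw [goA, gS]
      simp [h]
    refine ⟨hg, ?_⟩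
    intro digits merged pos hk
    rw [search, fS]
    split
    · rfl
    · exact hg digits merged pos 0 hk
  | succ k ih =>
    have hg : ∀ (digits merged : List Int) (pos cur : Int),
        (((digits.length : Int) - pos).toNat ≤ k + 1) →
        goA digits merged pos cur = gS digits pos cur merged.getLast? := by
      intro digits merged pos cur hk
      rw [goA, gS]
      by_cases h : pos < (digits.length : Int)
      · simp only [dif_pos h]
        cases hget : PySem.List.pyGet? digits pos with
        | none => rfl
        | some d =>
          simp only
          have hrec : ((digits.length : Int) - (pos + 1)).toNat ≤ k := by omega
          have h1 := ih.1 digits merged (pos + 1) (cur * 10 + d) hrec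
          have h2 := ih.2 digits (merged ++ [cur * 10 + d]) (pos + 1) hrec
          rw [List.getLast?_append] at h2
          simp only [List.getLast?_singleton] at h2
          cases hlast : merged.getLast? with
          | none =>
            simp only [hlast] at h1 ⊢
            by_cases hp : isPrimeA (cur * 10 + d) <;> simp [hp, h1, h2]
          | some l =>
            simp only [hlast] at h1 ⊢
            by_cases hcl : cur * 10 + d < l
            · have : ¬ (l ≤ cur * 10 + d) := by omega
              simp [hcl, this, h1]
            · have hle : l ≤ cur * 10 + d := by omega
              by_cases hp : isPrimeA (cur * 10 + d) <;> simp [hcl, hle, hp, h1, h2]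
      · simp [h]
    refine ⟨hg, ?_⟩
    intro digits merged pos hk
    rw [search, fS]
    split
    · rfl
    · exact hg digits merged pos 0 hk

-- memo soundness: every memo entry stores the memo-free count
def InvM (digits : List Int) (memo : PySem.Dict (Int × Option Int) Int) : Prop :=
  ∀ (p : Int) (l : Option Int) (v : Int), memo.get? (p, l) = some v → v = fS digits p l

theorem countB_char (digits : List Int) (pos : Int) (low : Option Int)
    (memo : PySem.Dict (Int × Option Int) Int) (hm : InvM digits memo)
    (hloop : (loopB digits (digits.length : Int) pos 0 0 low memo).1
               = 0 + gS digits pos 0 low ∧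
             InvM digits (loopB digits (digits.length : Int) pos 0 0 low memo).2) :
    (countB digits (digits.length : Int) pos low memo).1 = fS digits pos low ∧
    InvM digits (countB digits (digits.length : Int) pos low memo).2 := by
  rw [countB, fS]
  by_cases hq : pos == (digits.length : Int)
  · simp [hq, hm]
  · simp only [hq, if_neg, Bool.false_eq_true, not_false_eq_true]
    cases hget : memo.get? (pos, low) with
    | some v =>
      simp only
      have := hm pos low v hget
      rw [fS] at this
      simp only [hq] at this
      exact ⟨this, hm⟩
    | none =>
      simp only
      obtain ⟨hv, hinv⟩ := hloop
      constructor
      · omega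
      · intro p l v hpl
        rw [PySem.Dict.get?_insert] at hpl
        by_cases he : (p, l) = (pos, low)
        · rw [if_pos he] at hpl
          injection hpl with hv2
          obtain ⟨hp, hl2⟩ : p = pos ∧ l = low :=
            ⟨congrArg Prod.fst he, congrArg Prod.snd he⟩
          rw [hp, hl2]
          have hfs : fS digits pos low = gS digits pos 0 low := by
            rw [fS]; simp [hq]
          rw [hfs, ← hv2, hv]
          exact zero_add _
        · rw [if_neg he] at hpl
          exact hinv p l v hpl

theorem B_eq (k : ℕ) :
    (∀ (digits : List Int) (i cur total : Int) (low : Option Int)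
        (memo : PySem.Dict (Int × Option Int) Int),
      InvM digits memo → (∀ d ∈ digits, 0 ≤ d) → 0 ≤ cur →
      (((digits.length : Int) - i).toNat ≤ k) →
      (loopB digits (digits.length : Int) i cur total low memo).1
        = total + gS digits i cur low ∧
      InvM digits (loopB digits (digits.length : Int) i cur total low memo).2) ∧
    (∀ (digits : List Int) (pos : Int) (low : Option Int)
        (memo : PySem.Dict (Int × Option Int) Int),
      InvM digits memo → (∀ d ∈ digits, 0 ≤ d) →
      (((digits.length : Int) - pos).toNat ≤ k) →
      (countB digits (digits.length : Int) pos low memo).1 = fS digits pos low ∧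
      InvM digits (countB digits (digits.length : Int) pos low memo).2) := by
  induction k with
  | zero =>
    have hl : ∀ (digits : List Int) (i cur total : Int) (low : Option Int)
        (memo : PySem.Dict (Int × Option Int) Int),
        InvM digits memo → (∀ d ∈ digits, 0 ≤ d) → 0 ≤ cur →
        (((digits.length : Int) - i).toNat ≤ 0) →
        (loopB digits (digits.length : Int) i cur total low memo).1
          = total + gS digits i cur low ∧
        InvM digits (loopB digits (digits.length : Int) i cur total low memo).2 := by
      intro digits i cur total low memo hm hd hc hk
      have h : ¬ (i < (digits.length : Int)) := by omega
      rw [loopB, gS]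
      simp [h, hm]
    exact ⟨hl, fun digits pos low memo hm hd hk =>
      countB_char digits pos low memo hm (hl digits pos 0 0 low memo hm hd le_rfl hk)⟩
  | succ k ih =>
    have hl : ∀ (digits : List Int) (i cur total : Int) (low : Option Int)
        (memo : PySem.Dict (Int × Option Int) Int),
        InvM digits memo → (∀ d ∈ digits, 0 ≤ d) → 0 ≤ cur →
        (((digits.length : Int) - i).toNat ≤ k + 1) →
        (loopB digits (digits.length : Int) i cur total low memo).1
          = total + gS digits i cur low ∧
        InvM digits (loopB digits (digits.length : Int) i cur total low memo).2 := by
      intro digits i cur total low memo hm hd hc hk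
      rw [loopB, gS]
      by_cases h : i < (digits.length : Int)
      · simp only [dif_pos h]
        cases hget : PySem.List.pyGet? digits i with
        | none => simp [hm]
        | some d =>
          simp only
          have hd0 : 0 ≤ d := hd d (PySem.List.mem_of_pyGet?_eq_some _ hget)
          have hc0 : 0 ≤ cur * 10 + d := by omega
          have hrec : ((digits.length : Int) - (i + 1)).toNat ≤ k := by omega
          rw [isPrimeB_eq _ hc0]
          by_cases hcond : (match low with
              | none => true
              | some l => decide (l ≤ cur * 10 + d)) && isPrimeA (cur * 10 + d)
          · simp only [hcond, if_pos]
            obtain ⟨hv1, hm1⟩ := ih.2 digits (i + 1) (some (cur * 10 + d)) memo hm hd hrec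
            obtain ⟨hv2, hm2⟩ := ih.1 digits (i + 1) (cur * 10 + d)
              (total + (countB digits (digits.length : Int) (i + 1)
                 (some (cur * 10 + d)) memo).1) low _ hm1 hd hc0 hrec
            refine ⟨?_, hm2⟩
            rw [hv2, hv1]
            ring
          · rw [Bool.not_eq_true] at hcond
            rw [hcond]
            simp only [Bool.false_eq_true, if_false]
            obtain ⟨hv2, hm2⟩ := ih.1 digits (i + 1) (cur * 10 + d) total low memo hm hd hc0 hrec
            refine ⟨?_, hm2⟩
            rw [hv2]
            ring
      · simp [h, hm]
    exact ⟨hl, fun digits pos low memo hm hd hk =>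
      countB_char digits pos low memo hm (hl digits pos 0 0 low memo hm hd le_rfl hk)⟩

-- ===== VERDICT (by name: the statement is the Claim_ definition above) =====
theorem search_spec : Claim_equal_search := by
  intro digits merged first_pos _hdom hpre
  unfold Spec_search search_alt
  obtain ⟨hd, _hfp⟩ := hpre
  have hA := (A_eq (((digits.length : Int) - first_pos).toNat)).2 digits merged first_pos le_rfl
  have hB := (B_eq (((digits.length : Int) - first_pos).toNat)).2 digits first_pos
    merged.getLast? PySem.Dict.empty
    (by intro p l v h; simp [PySem.Dict.get?_empty] at h)
    hd le_rfl
  rw [hA, hB.1]
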